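-- pv_equiv track=rewrite | github.com/apoltronieri/DSLRecommendationSystem | mining-pipeline/src/github_scraper.py | is_mps_repo
-- ===== SOURCE A (Python) =====
-- def is_mps_repo(tree):
--     has_mps = False
--     has_mpl_or_msd = False
--
--     for item in tree:
--         path = item["path"]
--         if path.endswith(".mps"):
--             has_mps = True
--         if path.endswith(".mpl") or path.endswith(".msd"):
--             has_mpl_or_msd = True
--         if "/languages/" in path and path.endswith("structure.mps"):
--             return True
--
--     return has_mps and has_mpl_or_msd
-- ===== SOURCE B (Python) =====
-- def is_mps_repo(tree):
--     return (
--         any("/languages/" in item["path"] and item["path"].endswith("structure.mps")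
--             for item in tree)
--         or (any(item["path"].endswith(".mps") for item in tree)
--             and any(item["path"].endswith(".mpl") or item["path"].endswith(".msd")
--                     for item in tree))
--     )
-- ===== Notes on version B (the rewrite author's own statement) =====
-- stated objective: idiomatic
-- what changed: Replaces the fused single-pass accumulator loop with early return by a single boolean expression of three independent any(...) predicate scans over the tree.
import Mathlib
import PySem

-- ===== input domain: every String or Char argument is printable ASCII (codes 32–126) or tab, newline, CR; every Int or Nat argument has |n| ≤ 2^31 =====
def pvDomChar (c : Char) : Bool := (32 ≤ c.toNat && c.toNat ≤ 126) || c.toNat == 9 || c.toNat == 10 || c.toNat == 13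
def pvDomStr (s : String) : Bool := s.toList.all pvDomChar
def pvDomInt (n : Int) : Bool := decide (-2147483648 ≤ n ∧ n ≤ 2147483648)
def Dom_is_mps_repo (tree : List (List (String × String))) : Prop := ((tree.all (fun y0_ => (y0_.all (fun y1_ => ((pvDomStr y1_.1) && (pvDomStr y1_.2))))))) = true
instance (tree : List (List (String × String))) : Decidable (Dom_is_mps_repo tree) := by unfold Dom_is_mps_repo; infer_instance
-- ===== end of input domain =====

-- B replaces A's fused accumulator loop (with early return) by one boolean
-- expression of three independent any-scans; objective: idiomatic, no speed claim.

-- ===== PORT A =====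
-- the fused loop: flags has_mps / has_mpl_or_msd, early return on a
-- "/languages/"…"structure.mps" path; a missing "path" key is a KeyError in
-- Python (excluded by Pre_), here the branch returns false arbitrarily.
def is_mps_repo_loop (tree : List (List (String × String)))
    (has_mps has_mpl_or_msd : Bool) : Bool :=
  match tree with
  | [] => has_mps && has_mpl_or_msd
  | item :: rest =>
    match PySem.Dict.get? (PySem.Dict.mk item) "path" with
    | none => false  -- Python raises KeyError here; outside Pre_
    | some path =>
      let has_mps := if PySem.Str.endswith path ".mps" then true else has_mps
      let has_mpl_or_msd :=
        if PySem.Str.endswith path ".mpl" || PySem.Str.endswith path ".msd" then true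
        else has_mpl_or_msd
      if PySem.Str.isIn "/languages/" path && PySem.Str.endswith path "structure.mps" then
        true
      else
        is_mps_repo_loop rest has_mps has_mpl_or_msd

def is_mps_repo (tree : List (List (String × String))) : Bool :=
  is_mps_repo_loop tree false false

-- ===== PORT B =====
-- three independent predicate scans combined in one boolean expression
def is_mps_repo_alt (tree : List (List (String × String))) : Bool :=
  (tree.any fun item =>
      match PySem.Dict.get? (PySem.Dict.mk item) "path" with
      | none => false
      | some p => PySem.Str.isIn "/languages/" p && PySem.Str.endswith p "structure.mps")
  || ((tree.any fun item =>
        match PySem.Dict.get? (PySem.Dict.mk item) "path" with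
        | none => false
        | some p => PySem.Str.endswith p ".mps")
      && (tree.any fun item =>
        match PySem.Dict.get? (PySem.Dict.mk item) "path" with
        | none => false
        | some p => PySem.Str.endswith p ".mpl" || PySem.Str.endswith p ".msd"))

-- ===== PRECONDITION & SPEC =====
-- Pre_ excludes only items without a "path" key, on which Python A raises KeyError.
def Pre_is_mps_repo (tree : List (List (String × String))) : Prop :=
  (tree.all fun item => PySem.Dict.contains (PySem.Dict.mk item) "path") = true
instance (tree : List (List (String × String))) : Decidable (Pre_is_mps_repo tree) := by unfold Pre_is_mps_repo; infer_instance

def pvWitness_is_mps_repo : (List (List (String × String))) :=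
  [[("path", "a.mps")], [("path", "solutions/b.msd")]]

def Spec_is_mps_repo (tree : List (List (String × String))) (out : Bool) : Prop := out = is_mps_repo_alt tree
instance (tree : List (List (String × String))) (out : Bool) : Decidable (Spec_is_mps_repo tree out) := by unfold Spec_is_mps_repo; infer_instance

-- ===== CLAIM (what is proved, stated in full; the proofs are below) =====
def Claim_equal_is_mps_repo : Prop := ∀ (tree : List (List (String × String))), Dom_is_mps_repo tree → Pre_is_mps_repo tree → Spec_is_mps_repo tree (is_mps_repo tree)

-- ===== LEMMAS AND PROOFS =====

theorem is_mps_repo_loop_eq (tree : List (List (String × String)))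
    (a b : Bool)
    (h : (tree.all fun item => PySem.Dict.contains (PySem.Dict.mk item) "path") = true) :
    is_mps_repo_loop tree a b
      = ((tree.any fun item =>
            match PySem.Dict.get? (PySem.Dict.mk item) "path" with
            | none => false
            | some p => PySem.Str.isIn "/languages/" p && PySem.Str.endswith p "structure.mps")
        || ((a || tree.any fun item =>
              match PySem.Dict.get? (PySem.Dict.mk item) "path" with
              | none => false
              | some p => PySem.Str.endswith p ".mps")
            && (b || tree.any fun item =>
              match PySem.Dict.get? (PySem.Dict.mk item) "path" with
              | none => false
              | some p => PySem.Str.endswith p ".mpl" || PySem.Str.endswith p ".msd"))) := by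
  induction tree generalizing a b with
  | nil => simp [is_mps_repo_loop]
  | cons item rest ih =>
    simp only [List.all_cons, Bool.and_eq_true] at h
    obtain ⟨hitem, hrest⟩ := h
    have hsome : (PySem.Dict.get? (PySem.Dict.mk item) "path").isSome := by
      rw [PySem.Dict.contains_eq_isSome_get?] at hitem
      exact hitem
    obtain ⟨p, hp⟩ := Option.isSome_iff_exists.mp hsome
    simp only [is_mps_repo_loop, hp, List.any_cons]
    by_cases hs : (PySem.Str.isIn "/languages/" p && PySem.Str.endswith p "structure.mps") = true
    · simp at hs
      simp [hs]
    · rw [if_neg (by simp_all), ih _ _ hrest]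
      simp only [Bool.not_eq_true] at hs
      rw [hs]
      cases PySem.Str.endswith p ".mps" <;>
        cases (PySem.Str.endswith p ".mpl" || PySem.Str.endswith p ".msd") <;>
        cases a <;> cases b <;> simp

-- ===== VERDICT (by name: the statement is the Claim_ definition above) =====
theorem is_mps_repo_spec : Claim_equal_is_mps_repo := by
  intro tree _ hpre
  unfold Spec_is_mps_repo is_mps_repo is_mps_repo_alt
  rw [is_mps_repo_loop_eq tree false false hpre]
  simp
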